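-- pv_equiv track=rewrite | github.com/LChanger/LeetCode | LeetCode/LeetCode16.18.py | patternMatching
-- ===== SOURCE A (Python) =====
-- def patternMatching(pattern: str, value: str) -> bool:
--     if not pattern and value:return False
--     if not pattern and not value:return True
--     a_times=0
--     b_times=0
--
--     for i in range(len(pattern)):
--         if pattern[i]=='a':a_times+=1
--         else: b_times+=1
--     if a_times==0 or b_times==0:
--         l=len(value)//max(a_times,b_times)
--         if not l:return True
--         temp=value[:l]
--         for i in range(l,len(value),l):
--             if value[i:i+l]!=temp:return False
--         return True
--     #测试a的长度
--     max_a=len(value)//a_times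
--     for al in range(0,max_a+1):
--         bl=(len(value)-al*a_times)//b_times
--         start=0
--         a=''
--         b=''
--         for p in pattern:
--             if p=='a':
--                 temp=value[start:start+al]
--                 if a=='':
--                     a=temp
--                 elif a!=temp:
--                     break
--                 start+=al
--             elif p=='b':
--                 temp=value[start:start+bl]
--                 if b=='':
--                     b=temp
--                 elif b!=temp:
--                     break
--                 start+=bl
--         if start==len(value) and a!=b:return True
--     return False
-- ===== SOURCE B (Python) =====
-- def patternMatching(pattern: str, value: str) -> bool:
--     if not pattern:
--         return not value
--     ca = pattern.count('a')
--     cb = len(pattern) - ca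
--     n = len(value)
--     if ca == 0 or cb == 0:
--         l = n // max(ca, cb)
--         return l == 0 or (n % l == 0 and value == value[:l] * (n // l))
--     # offsets of the first 'a' / first 'b' are linear in (al, bl): precompute the coefficients once
--     b_before_a = pattern[:pattern.index('a')].count('b')
--     has_b = 'b' in pattern
--     a_before_b = pattern[:pattern.index('b')].count('a') if has_b else 0
--     for al in range(n // ca + 1):
--         bl = (n - al * ca) // cb
--         a_cand = value[bl * b_before_a:bl * b_before_a + al]
--         b_cand = value[al * a_before_b:al * a_before_b + bl] if has_b else ''
--         if a_cand != b_cand and value == ''.join(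
--                 a_cand if c == 'a' else b_cand if c == 'b' else '' for c in pattern):
--             return True
--     return False
-- ===== Notes on version B (the rewrite author's own statement) =====
-- stated objective: alternative
-- what changed: B replaces A's stateful scan (running start offset, sentinel-empty a/b candidates, early break) by a direct construct-and-compare: the offsets of the first 'a' and first 'b' are obtained in closed form from two prefix counts computed once, the two candidate substrings are sliced out, and the whole expected string is rebuilt and compared to value; the single-letter branch tests periodicity by replicate-and-compare instead of a chunk-scanning loop.
import Mathlib
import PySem

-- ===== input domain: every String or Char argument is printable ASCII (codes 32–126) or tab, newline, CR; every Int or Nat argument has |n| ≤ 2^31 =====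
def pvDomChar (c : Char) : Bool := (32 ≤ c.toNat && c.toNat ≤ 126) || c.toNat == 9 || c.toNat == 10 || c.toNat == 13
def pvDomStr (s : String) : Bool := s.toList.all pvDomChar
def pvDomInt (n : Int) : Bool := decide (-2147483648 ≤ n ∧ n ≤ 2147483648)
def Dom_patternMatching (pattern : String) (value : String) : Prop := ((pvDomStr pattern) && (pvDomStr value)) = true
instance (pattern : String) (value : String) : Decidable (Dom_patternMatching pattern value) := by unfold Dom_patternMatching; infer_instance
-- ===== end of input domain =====

-- B rebuilds the expected string from closed-form first-'a'/first-'b' offsets and compares it to value,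
-- instead of A's stateful scan with a running offset, sentinel-empty candidates and an early break
-- (objective: alternative; same return value, no mutation involved).

-- ===== PORT A =====
-- A's inner `for p in pattern` loop body: state (start, a, b, broken); Python's `break` is modelled
-- by the `broken` flag (once set, the state no longer changes, as after a break in Python).
def pvStepA (value : List Char) (al bl : Int) (st : Int × List Char × List Char × Bool) (p : Char) :
    Int × List Char × List Char × Bool :=
  if st.2.2.2 then st
  else if p = 'a' then
    let temp := PySem.List.slice value (some st.1) (some (st.1 + al))
    if st.2.1 = [] then (st.1 + al, temp, st.2.2.1, false)
    else if st.2.1 ≠ temp then (st.1, st.2.1, st.2.2.1, true)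
    else (st.1 + al, st.2.1, st.2.2.1, false)
  else if p = 'b' then
    let temp := PySem.List.slice value (some st.1) (some (st.1 + bl))
    if st.2.2.1 = [] then (st.1 + bl, st.2.1, temp, false)
    else if st.2.2.1 ≠ temp then (st.1, st.2.1, st.2.2.1, true)
    else (st.1 + bl, st.2.1, st.2.2.1, false)
  else st

-- A, step for step, over the strings' character lists (Python str ops = PySem.List ops on toList;
-- the counting loop is a fold, the `for...return True/False` loops are pyRange any/all).
def pvA (pattern value : List Char) : Bool :=
  if pattern = [] ∧ value ≠ [] then false
  else if pattern = [] ∧ value = [] then true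
  else
    let counts := pattern.foldl
      (fun (ab : Int × Int) c => if c = 'a' then (ab.1 + 1, ab.2) else (ab.1, ab.2 + 1)) (0, 0)
    let a_times := counts.1
    let b_times := counts.2
    if a_times = 0 ∨ b_times = 0 then
      let l := PySem.Int.floordiv (value.length : Int) (max a_times b_times)
      if l = 0 then true
      else
        let temp := PySem.List.slice value none (some l)
        (PySem.List.pyRange l (value.length : Int) l).all
          (fun i => PySem.List.slice value (some i) (some (i + l)) == temp)
    else
      let max_a := PySem.Int.floordiv (value.length : Int) a_times
      (PySem.List.pyRange 0 (max_a + 1) 1).any (fun al =>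
        let bl := PySem.Int.floordiv ((value.length : Int) - al * a_times) b_times
        let st := pattern.foldl (pvStepA value al bl) ((0 : Int), ([] : List Char), ([] : List Char), false)
        st.1 == (value.length : Int) && st.2.1 != st.2.2.1)

def patternMatching (pattern : String) (value : String) : Bool :=
  pvA pattern.toList value.toList

-- ===== PORT B =====
-- value[:l] * k  (Python sequence repetition; a non-positive k gives '' exactly as toNat gives 0)
def pvRepeat (xs : List Char) (k : Int) : List Char := (List.replicate k.toNat xs).flatten

-- B, step for step (Source B): counts, closed-form first-'a'/first-'b' offsets from two prefix counts,
-- slice the two candidates, rebuild the expected string (''.join = flatten of map) and compare.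
def pvB (pattern value : List Char) : Bool :=
  if pattern = [] then value == []
  else
    let ca : Int := (PySem.List.count pattern 'a' : Int)
    let cb : Int := (pattern.length : Int) - ca
    let n : Int := (value.length : Int)
    if ca = 0 ∨ cb = 0 then
      let l := PySem.Int.floordiv n (max ca cb)
      l == 0 || (PySem.Int.mod n l == 0 &&
        value == pvRepeat (PySem.List.slice value none (some l)) (PySem.Int.floordiv n l))
    else
      let b_before_a : Int := match PySem.List.index? pattern 'a' with
        | some i => (PySem.List.count (PySem.List.slice pattern none (some (i : Int))) 'b' : Int)
        | none => 0
      let has_b := 'b' ∈ pattern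
      let a_before_b : Int := if has_b then
          match PySem.List.index? pattern 'b' with
          | some i => (PySem.List.count (PySem.List.slice pattern none (some (i : Int))) 'a' : Int)
          | none => 0
        else 0
      (PySem.List.pyRange 0 (PySem.Int.floordiv n ca + 1) 1).any (fun al =>
        let bl := PySem.Int.floordiv (n - al * ca) cb
        let aCand := PySem.List.slice value (some (bl * b_before_a)) (some (bl * b_before_a + al))
        let bCand := if has_b then
            PySem.List.slice value (some (al * a_before_b)) (some (al * a_before_b + bl))
          else []
        aCand != bCand &&
          value == (pattern.map (fun c => if c = 'a' then aCand else if c = 'b' then bCand else [])).flatten)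

def patternMatching_alt (pattern : String) (value : String) : Bool :=
  pvB pattern.toList value.toList

-- ===== PRECONDITION & SPEC =====
def Spec_patternMatching (pattern : String) (value : String) (out : Bool) : Prop := out = patternMatching_alt pattern value
instance (pattern : String) (value : String) (out : Bool) : Decidable (Spec_patternMatching pattern value out) := by unfold Spec_patternMatching; infer_instance

-- ===== CLAIM (what is proved, stated in full; the proofs are below) =====
def Claim_equal_patternMatching : Prop := ∀ (pattern : String) (value : String), Dom_patternMatching pattern value → Spec_patternMatching pattern value (patternMatching pattern value)

-- ===== LEMMAS AND PROOFS =====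
-- Nat-side bookkeeping for the proof: per-char advance, total advance, the piece a pattern char
-- contributes to the rebuilt string, and A's inner loop as a function of the remaining pattern.
def pvAdv (na nb : Nat) (c : Char) : Nat := if c = 'a' then na else if c = 'b' then nb else 0
def pvSum (na nb : Nat) (S : List Char) : Nat := (S.map (pvAdv na nb)).sum
def pvPiece (aC bC : List Char) (c : Char) : List Char := if c = 'a' then aC else if c = 'b' then bC else []
def pvCheck (V : List Char) (al bl : Int) (S : List Char) (st : Int × List Char × List Char × Bool) : Bool :=
  let r := S.foldl (pvStepA V al bl) st
  (r.1 == (V.length : Int)) && (r.2.1 != r.2.2.1)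

theorem pvSum_cons (na nb : Nat) (c : Char) (S : List Char) :
    pvSum na nb (c :: S) = pvAdv na nb c + pvSum na nb S := by
  simp [pvSum]

theorem pvSum_eq (na nb : Nat) (P : List Char) :
    pvSum na nb P = na * P.count 'a' + nb * P.count 'b' := by
  induction P with
  | nil => simp [pvSum]
  | cons c S ih =>
    rw [pvSum_cons, ih]
    by_cases h1 : c = 'a'
    · subst h1; simp [pvAdv, List.count_cons]; ring
    · by_cases h2 : c = 'b'
      · subst h2; simp [pvAdv, List.count_cons]; ring
      · simp [pvAdv, h1, h2, List.count_cons, Ne.symm h1, Ne.symm h2]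

theorem pvTW (v : Char) (pre suf : List Char) (h : v ∉ pre) :
    List.takeWhile (fun c => c != v) (pre ++ v :: suf) = pre := by
  induction pre with
  | nil => simp
  | cons x xs ih =>
    have hx : x ≠ v := by intro e; exact h (e ▸ List.mem_cons_self)
    simp only [List.cons_append, List.takeWhile_cons]
    simp [hx, ih (fun m => h (List.mem_cons_of_mem _ m))]

theorem pvSplit {w t X : List Char} : w = t ++ X ↔ (w.take t.length = t ∧ w.drop t.length = X) := by
  constructor
  · rintro rfl; exact ⟨List.take_left, List.drop_left⟩
  · rintro ⟨h1, h2⟩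
    conv_lhs => rw [← List.take_append_drop t.length w]
    rw [h1, h2]

theorem pvCheck_cons (V : List Char) (al bl : Int) (c : Char) (S : List Char) (st) :
    pvCheck V al bl (c :: S) st = pvCheck V al bl S (pvStepA V al bl st c) := rfl

theorem pvCheck_frozen (V : List Char) (al bl : Int) (S : List Char) (st : Int × List Char × List Char × Bool)
    (h : st.2.2.2 = true) :
    pvCheck V al bl S st = ((st.1 == (V.length : Int)) && (st.2.1 != st.2.2.1)) := by
  induction S generalizing st with
  | nil => rfl
  | cons c S ih =>
    rw [pvCheck_cons]
    have : pvStepA V al bl st c = st := by simp [pvStepA, h]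
    rw [this, ih st h]

theorem pvAnyCongr (l : List Int) (p q : Int → Bool) (h : ∀ x ∈ l, p x = q x) :
    l.any p = l.any q := by
  induction l with
  | nil => rfl
  | cons x xs ih =>
    simp only [List.any_cons, h x List.mem_cons_self, ih (fun y hy => h y (List.mem_cons_of_mem _ hy))]

theorem pvRep (lN : Nat) (hl : 0 < lN) (temp : List Char) (ht : temp.length = lN) (W : List Char) :
    (∀ j : Nat, lN * j < W.length → (W.drop (lN * j)).take lN = temp)
      ↔ (lN ∣ W.length ∧ W = (List.replicate (W.length / lN) temp).flatten) := by
  by_cases h0 : W.length = 0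
  · have hw : W = [] := List.eq_nil_of_length_eq_zero h0
    subst hw
    simp
  · by_cases hsmall : W.length < lN
    · constructor
      · intro h
        exfalso
        have h00 := h 0 (by simpa using Nat.pos_of_ne_zero h0)
        have hW : W.take lN = W := List.take_of_length_le (le_of_lt hsmall)
        rw [Nat.mul_zero, List.drop_zero, hW] at h00
        have := congrArg List.length h00
        rw [ht] at this
        omega
      · rintro ⟨⟨k, hk⟩, _⟩
        rcases k with _ | k
        · omega
        · have : lN ≤ lN * (k+1) := by nlinarith
          omega
    · push_neg at hsmall
      have hdl : (W.drop lN).length = W.length - lN := by simp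
      have ihlt : (W.drop lN).length < W.length := by omega
      have IH := pvRep lN hl temp ht (W.drop lN)
      have hq : W.length / lN = (W.length - lN) / lN + 1 := by
        conv_lhs => rw [show W.length = (W.length - lN) + lN by omega]
        exact Nat.add_div_right _ hl
      constructor
      · intro h
        have h00 := h 0 (by omega)
        rw [Nat.mul_zero, List.drop_zero] at h00
        have htail : ∀ j : Nat, lN * j < (W.drop lN).length → ((W.drop lN).drop (lN * j)).take lN = temp := by
          intro j hj
          rw [List.drop_drop, show lN + lN * j = lN * (j+1) by ring]
          have harith : lN + lN * j = lN * (j+1) := by ring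
          exact h (j+1) (by rw [hdl] at hj; omega)
        obtain ⟨hdvd, heq⟩ := IH.mp htail
        rw [hdl] at hdvd heq
        have hdvd' : lN ∣ W.length := by
          have := Nat.dvd_add hdvd (Nat.dvd_refl lN)
          rwa [Nat.sub_add_cancel hsmall] at this
        refine ⟨hdvd', ?_⟩
        rw [hq, List.replicate_succ, List.flatten_cons, ← heq, ← h00]
        exact (List.take_append_drop lN W).symm
      · rintro ⟨hdvd, heq⟩
        have hdvd2 : lN ∣ (W.length - lN) := Nat.dvd_sub hdvd (Nat.dvd_refl lN)
        have hWsplit : W = temp ++ (List.replicate ((W.length - lN) / lN) temp).flatten := by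
          conv_lhs => rw [heq]
          rw [hq, List.replicate_succ, List.flatten_cons]
        have hdrop : W.drop lN = (List.replicate ((W.length - lN) / lN) temp).flatten := by
          conv_lhs => rw [hWsplit]
          exact List.drop_left' ht
        have htake : W.take lN = temp := by
          conv_lhs => rw [hWsplit]
          exact List.take_left' ht
        have htail := IH.mpr ⟨by rw [hdl]; exact hdvd2, by rw [hdl]; exact hdrop⟩
        intro j hj
        rcases j with _ | j
        · rw [Nat.mul_zero, List.drop_zero]; exact htake
        · have harith : lN * (j+1) = lN + lN * j := by ring
          rw [harith, ← List.drop_drop]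
          exact htail j (by rw [hdl]; omega)
termination_by W.length

theorem pvRun (V : List Char) (na nb : Nat) (aC bC : List Char) (haC : aC.length = na)
    (S : List Char) (off : Nat) (a0 b0 : List Char)
    (hb : off + pvSum na nb S ≤ V.length)
    (hA : a0 = aC ∨ (a0 = [] ∧
        ('a' ∈ S → aC = (V.drop (off + nb * ((S.takeWhile (fun c => c != 'a')).count 'b'))).take na) ∧
        ('a' ∉ S → aC = [])))
    (hB : b0 = bC ∨ (b0 = [] ∧
        ('b' ∈ S → bC = (V.drop (off + na * ((S.takeWhile (fun c => c != 'b')).count 'a'))).take nb) ∧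
        ('b' ∉ S → bC = [])))
    (hbC : bC.length = nb ∨ (bC = [] ∧ 'b' ∉ S)) :
    pvCheck V (na : Int) (nb : Int) S ((off : Int), a0, b0, false)
      = ((V.drop off == (S.map (pvPiece aC bC)).flatten) && (aC != bC)) := by
  induction S generalizing off a0 b0 with
  | nil =>
    have ha : a0 = aC := by
      rcases hA with h | ⟨h1, _, h3⟩
      · exact h
      · rw [h1, h3 (by simp)]
    have hbb : b0 = bC := by
      rcases hB with h | ⟨h1, _, h3⟩
      · exact h
      · rw [h1, h3 (by simp)]
    subst ha hbb
    have hoff : off ≤ V.length := by simpa [pvSum] using hb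
    show (((off : Int) == (V.length : Int)) && (a0 != b0)) = ((V.drop off == []) && (a0 != b0))
    congr 1
    rw [Bool.eq_iff_iff]
    simp only [beq_iff_eq, List.drop_eq_nil_iff]
    constructor
    · intro h; omega
    · intro h; omega
  | cons c S' IH =>
    rw [pvCheck_cons]
    rw [pvSum_cons] at hb
    by_cases hca : c = 'a'
    · subst hca
      have hadv : pvAdv na nb 'a' = na := by simp [pvAdv]
      rw [hadv] at hb
      have hslice : PySem.List.slice V (some (off : Int)) (some ((off : Int) + (na : Int))) =
          (V.drop off).take na := PySem.List.slice_natCast_add V off na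
      have htlen : ((V.drop off).take na).length = na := by
        simp only [List.length_take, List.length_drop]
        omega
      have hcast : ((off : Int) + (na : Int)) = (((off + na : Nat)) : Int) := by push_cast; ring
      -- hypotheses for the tail
      have hb' : (off + na) + pvSum na nb S' ≤ V.length := by omega
      have hB' : b0 = bC ∨ (b0 = [] ∧
          ('b' ∈ S' → bC = (V.drop ((off + na) + na * ((S'.takeWhile (fun c => c != 'b')).count 'a'))).take nb) ∧
          ('b' ∉ S' → bC = [])) := by
        rcases hB with h | ⟨h1, h2, h3⟩
        · exact Or.inl h
        · refine Or.inr ⟨h1, ?_, ?_⟩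
          · intro hmem
            have h2' := h2 (List.mem_cons_of_mem _ hmem)
            have htw : List.takeWhile (fun c => c != 'b') ('a' :: S') =
                'a' :: List.takeWhile (fun c => c != 'b') S' := by
              simp [List.takeWhile_cons]
            rw [htw, List.count_cons_self] at h2'
            rw [h2']
            have harith : off + na * ((S'.takeWhile (fun c => c != 'b')).count 'a' + 1)
                = (off + na) + na * ((S'.takeWhile (fun c => c != 'b')).count 'a') := by ring
            rw [harith]
          · intro hnm
            exact h3 (by simp [hnm])
      have hbC' : bC.length = nb ∨ (bC = [] ∧ 'b' ∉ S') := by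
        rcases hbC with h | ⟨h1, h2⟩
        · exact Or.inl h
        · exact Or.inr ⟨h1, fun m => h2 (List.mem_cons_of_mem _ m)⟩
      -- RHS head piece
      have hpiece : pvPiece aC bC 'a' = aC := by simp [pvPiece]
      by_cases h0 : a0 = []
      · -- set branch; the assigned slice IS aC
        have hteq : (V.drop off).take na = aC := by
          rcases hA with h | ⟨h1, h2, _⟩
          · have haCnil : aC = [] := h ▸ h0
            have hna0 : na = 0 := by rw [← haC, haCnil]; rfl
            rw [hna0, haCnil, List.take_zero]
          · have h2' := h2 List.mem_cons_self
            have htw : List.takeWhile (fun c => c != 'a') ('a' :: S') = [] := by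
              simp [List.takeWhile_cons]
            rw [htw] at h2'
            simp only [List.count_nil, Nat.mul_zero, Nat.add_zero] at h2'
            exact h2'.symm
        have hstep : pvStepA V (na : Int) (nb : Int) ((off : Int), a0, b0, false) 'a'
            = ((off : Int) + (na : Int), aC, b0, false) := by
          simp [pvStepA, h0, hslice, hteq]
        rw [hstep, hcast, IH (off + na) aC b0 hb' (Or.inl rfl) hB' hbC']
        -- fold the head back into the RHS
        rw [Bool.eq_iff_iff]
        simp only [Bool.and_eq_true, beq_iff_eq, List.map_cons, List.flatten_cons, hpiece]
        have hfc : (V.drop off = aC ++ (S'.map (pvPiece aC bC)).flatten)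
            ↔ (V.drop (off + na) = (S'.map (pvPiece aC bC)).flatten) := by
          rw [pvSplit, haC]
          constructor
          · rintro ⟨_, hr⟩; rw [← hr, List.drop_drop]
          · intro hr
            refine ⟨hteq, ?_⟩
            rw [List.drop_drop]
            exact hr
        rw [hfc]
      · have ha0C : a0 = aC := by
          rcases hA with h | ⟨h1, _, _⟩
          · exact h
          · exact absurd h1 h0
        by_cases hm : a0 = (V.drop off).take na
        · have hstep : pvStepA V (na : Int) (nb : Int) ((off : Int), a0, b0, false) 'a'
              = ((off : Int) + (na : Int), a0, b0, false) := by
            simp [pvStepA, h0, hslice, hm]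
          have hteq : (V.drop off).take na = aC := by rw [← hm, ha0C]
          rw [hstep, hcast, ha0C, IH (off + na) aC b0 hb' (Or.inl rfl) hB' hbC']
          rw [Bool.eq_iff_iff]
          simp only [Bool.and_eq_true, beq_iff_eq, List.map_cons, List.flatten_cons, hpiece]
          have hfc : (V.drop off = aC ++ (S'.map (pvPiece aC bC)).flatten)
              ↔ (V.drop (off + na) = (S'.map (pvPiece aC bC)).flatten) := by
            rw [pvSplit, haC]
            constructor
            · rintro ⟨_, hr⟩; rw [← hr, List.drop_drop]
            · intro hr
              refine ⟨hteq, ?_⟩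
              rw [List.drop_drop]
              exact hr
          rw [hfc]
        · -- break: both sides are false
          have hstep : pvStepA V (na : Int) (nb : Int) ((off : Int), a0, b0, false) 'a'
              = ((off : Int), a0, b0, true) := by
            simp [pvStepA, h0, hslice, hm]
          rw [hstep, pvCheck_frozen V _ _ S' _ rfl]
          have hna0 : 0 < na := by
            rw [← haC, ← ha0C]
            exact List.length_pos_iff.mpr h0
          have hofflt : off < V.length := by omega
          have hl : (((off : Int)) == ((V.length : Int))) = false := by
            simp only [beq_eq_false_iff_ne, ne_eq, Int.natCast_inj]
            omega
          have hr : ((V.drop off) == ((('a' :: S').map (pvPiece aC bC)).flatten)) = false := by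
            simp only [List.map_cons, List.flatten_cons, hpiece, beq_eq_false_iff_ne, ne_eq]
            intro hcontra
            have := (pvSplit.mp hcontra).1
            rw [haC] at this
            exact hm (by rw [ha0C, ← this])
          rw [hl, hr]
          simp
    · by_cases hcb : c = 'b'
      · subst hcb
        have hadv : pvAdv na nb 'b' = nb := by simp [pvAdv]
        rw [hadv] at hb
        have hslice : PySem.List.slice V (some (off : Int)) (some ((off : Int) + (nb : Int))) =
            (V.drop off).take nb := PySem.List.slice_natCast_add V off nb
        have hcast : ((off : Int) + (nb : Int)) = (((off + nb : Nat)) : Int) := by push_cast; ring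
        have hb' : (off + nb) + pvSum na nb S' ≤ V.length := by omega
        have hbCmem : bC.length = nb := by
          rcases hbC with h | ⟨_, h2⟩
          · exact h
          · exact absurd List.mem_cons_self h2
        have hA' : a0 = aC ∨ (a0 = [] ∧
            ('a' ∈ S' → aC = (V.drop ((off + nb) + nb * ((S'.takeWhile (fun c => c != 'a')).count 'b'))).take na) ∧
            ('a' ∉ S' → aC = [])) := by
          rcases hA with h | ⟨h1, h2, h3⟩
          · exact Or.inl h
          · refine Or.inr ⟨h1, ?_, ?_⟩
            · intro hmem
              have h2' := h2 (List.mem_cons_of_mem _ hmem)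
              have htw : List.takeWhile (fun c => c != 'a') ('b' :: S') =
                  'b' :: List.takeWhile (fun c => c != 'a') S' := by
                simp [List.takeWhile_cons]
              rw [htw, List.count_cons_self] at h2'
              rw [h2']
              have harith : off + nb * ((S'.takeWhile (fun c => c != 'a')).count 'b' + 1)
                  = (off + nb) + nb * ((S'.takeWhile (fun c => c != 'a')).count 'b') := by ring
              rw [harith]
            · intro hnm
              exact h3 (by simp [hnm])
        have hbC' : bC.length = nb ∨ (bC = [] ∧ 'b' ∉ S') := Or.inl hbCmem
        have hpiece : pvPiece aC bC 'b' = bC := by simp [pvPiece]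
        by_cases h0 : b0 = []
        · have hteq : (V.drop off).take nb = bC := by
            rcases hB with h | ⟨h1, h2, _⟩
            · have hbCnil : bC = [] := h ▸ h0
              have hnb0 : nb = 0 := by rw [← hbCmem, hbCnil]; rfl
              rw [hnb0, hbCnil, List.take_zero]
            · have h2' := h2 List.mem_cons_self
              have htw : List.takeWhile (fun c => c != 'b') ('b' :: S') = [] := by
                simp [List.takeWhile_cons]
              rw [htw] at h2'
              simp only [List.count_nil, Nat.mul_zero, Nat.add_zero] at h2'
              exact h2'.symm
          have hstep : pvStepA V (na : Int) (nb : Int) ((off : Int), a0, b0, false) 'b'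
              = ((off : Int) + (nb : Int), a0, bC, false) := by
            simp [pvStepA, h0, hslice, hteq]
          rw [hstep, hcast, IH (off + nb) a0 bC hb' hA' (Or.inl rfl) hbC']
          rw [Bool.eq_iff_iff]
          simp only [Bool.and_eq_true, beq_iff_eq, List.map_cons, List.flatten_cons, hpiece]
          have hfc : (V.drop off = bC ++ (S'.map (pvPiece aC bC)).flatten)
              ↔ (V.drop (off + nb) = (S'.map (pvPiece aC bC)).flatten) := by
            rw [pvSplit, hbCmem]
            constructor
            · rintro ⟨_, hr⟩; rw [← hr, List.drop_drop]
            · intro hr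
              refine ⟨hteq, ?_⟩
              rw [List.drop_drop]
              exact hr
          rw [hfc]
        · have hb0C : b0 = bC := by
            rcases hB with h | ⟨h1, _, _⟩
            · exact h
            · exact absurd h1 h0
          by_cases hm : b0 = (V.drop off).take nb
          · have hstep : pvStepA V (na : Int) (nb : Int) ((off : Int), a0, b0, false) 'b'
                = ((off : Int) + (nb : Int), a0, b0, false) := by
              simp [pvStepA, h0, hslice, hm]
            have hteq : (V.drop off).take nb = bC := by rw [← hm, hb0C]
            rw [hstep, hcast, hb0C, IH (off + nb) a0 bC hb' hA' (Or.inl rfl) hbC']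
            rw [Bool.eq_iff_iff]
            simp only [Bool.and_eq_true, beq_iff_eq, List.map_cons, List.flatten_cons, hpiece]
            have hfc : (V.drop off = bC ++ (S'.map (pvPiece aC bC)).flatten)
                ↔ (V.drop (off + nb) = (S'.map (pvPiece aC bC)).flatten) := by
              rw [pvSplit, hbCmem]
              constructor
              · rintro ⟨_, hr⟩; rw [← hr, List.drop_drop]
              · intro hr
                refine ⟨hteq, ?_⟩
                rw [List.drop_drop]
                exact hr
            rw [hfc]
          · have hstep : pvStepA V (na : Int) (nb : Int) ((off : Int), a0, b0, false) 'b'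
                = ((off : Int), a0, b0, true) := by
              simp [pvStepA, h0, hslice, hm]
            rw [hstep, pvCheck_frozen V _ _ S' _ rfl]
            have hnb0 : 0 < nb := by
              rw [← hbCmem, ← hb0C]
              exact List.length_pos_iff.mpr h0
            have hofflt : off < V.length := by omega
            have hl : (((off : Int)) == ((V.length : Int))) = false := by
              simp only [beq_eq_false_iff_ne, ne_eq, Int.natCast_inj]
              omega
            have hr : ((V.drop off) == ((('b' :: S').map (pvPiece aC bC)).flatten)) = false := by
              simp only [List.map_cons, List.flatten_cons, hpiece, beq_eq_false_iff_ne, ne_eq]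
              intro hcontra
              have := (pvSplit.mp hcontra).1
              rw [hbCmem] at this
              exact hm (by rw [hb0C, ← this])
            rw [hl, hr]
            simp
      · -- c is neither 'a' nor 'b': the step is the identity and the piece is empty
        have hadv : pvAdv na nb c = 0 := by simp [pvAdv, hca, hcb]
        rw [hadv] at hb
        have hstep : pvStepA V (na : Int) (nb : Int) ((off : Int), a0, b0, false) c
            = ((off : Int), a0, b0, false) := by
          simp [pvStepA, hca, hcb]
        have hA' : a0 = aC ∨ (a0 = [] ∧
            ('a' ∈ S' → aC = (V.drop (off + nb * ((S'.takeWhile (fun c => c != 'a')).count 'b'))).take na) ∧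
            ('a' ∉ S' → aC = [])) := by
          rcases hA with h | ⟨h1, h2, h3⟩
          · exact Or.inl h
          · refine Or.inr ⟨h1, ?_, ?_⟩
            · intro hmem
              have h2' := h2 (List.mem_cons_of_mem _ hmem)
              have htw : List.takeWhile (fun x => x != 'a') (c :: S') =
                  c :: List.takeWhile (fun x => x != 'a') S' := by
                simp [List.takeWhile_cons, hca]
              rw [htw, List.count_cons_of_ne hcb] at h2'
              exact h2'
            · intro hnm
              exact h3 (by simp [hnm, Ne.symm hca])
        have hB' : b0 = bC ∨ (b0 = [] ∧
            ('b' ∈ S' → bC = (V.drop (off + na * ((S'.takeWhile (fun c => c != 'b')).count 'a'))).take nb) ∧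
            ('b' ∉ S' → bC = [])) := by
          rcases hB with h | ⟨h1, h2, h3⟩
          · exact Or.inl h
          · refine Or.inr ⟨h1, ?_, ?_⟩
            · intro hmem
              have h2' := h2 (List.mem_cons_of_mem _ hmem)
              have htw : List.takeWhile (fun x => x != 'b') (c :: S') =
                  c :: List.takeWhile (fun x => x != 'b') S' := by
                simp [List.takeWhile_cons, hcb]
              rw [htw, List.count_cons_of_ne hca] at h2'
              exact h2'
            · intro hnm
              exact h3 (by simp [hnm, Ne.symm hcb])
        have hbC' : bC.length = nb ∨ (bC = [] ∧ 'b' ∉ S') := by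
          rcases hbC with h | ⟨h1, h2⟩
          · exact Or.inl h
          · exact Or.inr ⟨h1, fun m => h2 (List.mem_cons_of_mem _ m)⟩
        rw [hstep, IH off a0 b0 (by omega) hA' hB' hbC']
        have hpiece : pvPiece aC bC c = [] := by simp [pvPiece, hca, hcb]
        rw [List.map_cons, List.flatten_cons, hpiece, List.nil_append]

theorem pvCounts (P : List Char) (x y : Int) :
    P.foldl (fun (ab : Int × Int) c => if c = 'a' then (ab.1 + 1, ab.2) else (ab.1, ab.2 + 1)) (x, y)
      = (x + (P.count 'a' : Int), y + (P.length : Int) - (P.count 'a' : Int)) := by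
  induction P generalizing x y with
  | nil => simp
  | cons c S ih =>
    rw [List.foldl_cons]
    by_cases h : c = 'a'
    · subst h
      rw [if_pos rfl, ih, List.count_cons_self, List.length_cons, Prod.mk.injEq]
      constructor <;> (push_cast; ring)
    · rw [if_neg h, ih, Prod.mk.injEq]
      constructor <;> (simp [h]; try (push_cast; ring))

theorem pvCountAB (P : List Char) : P.count 'a' + P.count 'b' ≤ P.length := by
  induction P with
  | nil => simp
  | cons c S ih =>
    by_cases h1 : c = 'a'
    · subst h1; simp [List.count_cons]; omega
    · by_cases h2 : c = 'b'
      · subst h2; simp [List.count_cons]; omega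
      · simp [List.count_cons, h1, h2, Ne.symm h1, Ne.symm h2]; omega

theorem pvSum_append (na nb : Nat) (l1 l2 : List Char) :
    pvSum na nb (l1 ++ l2) = pvSum na nb l1 + pvSum na nb l2 := by
  simp [pvSum]

theorem pvChunks (V : List Char) (lN : Nat) (hl : 0 < lN) (hle : lN ≤ V.length) :
    ((PySem.List.pyRange (lN : Int) (V.length : Int) (lN : Int)).all
        (fun i => PySem.List.slice V (some i) (some (i + (lN : Int))) == V.take lN))
      = (decide (lN ∣ V.length) && (V == (List.replicate (V.length / lN) (V.take lN)).flatten)) := by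
  have hlI : (0 : Int) < (lN : Int) := by exact_mod_cast hl
  have htlen : (V.take lN).length = lN := by simp; omega
  rw [Bool.eq_iff_iff]
  simp only [List.all_eq_true, Bool.and_eq_true, beq_iff_eq, decide_eq_true_eq]
  constructor
  · intro h
    apply (pvRep lN hl (V.take lN) htlen V).mp
    intro j hj
    rcases j with _ | j
    · rw [Nat.mul_zero, List.drop_zero]
    · have hmem : ((lN * (j+1) : Nat) : Int) ∈ PySem.List.pyRange (lN : Int) (V.length : Int) (lN : Int) := by
        rw [PySem.List.mem_pyRange_iff_of_pos hlI]
        refine ⟨?_, ?_, ⟨(j : Int), by push_cast; ring⟩⟩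
        · exact_mod_cast Nat.le_mul_of_pos_right lN (Nat.succ_pos j)
        · exact_mod_cast hj
      have hc := h _ hmem
      rw [PySem.List.slice_natCast_add] at hc
      exact hc
  · intro hrep i hi
    rw [PySem.List.mem_pyRange_iff_of_pos hlI] at hi
    obtain ⟨hi1, hi2, t, ht⟩ := hi
    have hmul : 0 ≤ (lN : Int) * t := by rw [← ht]; omega
    have ht0 : 0 ≤ t := by
      by_contra hneg
      push_neg at hneg
      have := mul_neg_of_pos_of_neg hlI hneg
      omega
    obtain ⟨j, rfl⟩ := Int.eq_ofNat_of_zero_le ht0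
    have hiv : i = ((lN * (j+1) : Nat) : Int) := by push_cast; push_cast at ht; linarith
    subst hiv
    rw [PySem.List.slice_natCast_add]
    exact (pvRep lN hl (V.take lN) htlen V).mpr hrep (j+1) (by exact_mod_cast hi2)

theorem pvA_eq_pvB (P V : List Char) : pvA P V = pvB P V := by
  by_cases hP : P = []
  · subst hP
    by_cases hV : V = [] <;> simp [pvA, pvB, hV]
  · have hPlen : 0 < P.length := List.length_pos_iff.mpr hP
    have hcaLe : List.count 'a' P ≤ P.length := List.count_le_length
    simp only [pvA, pvB, if_neg (fun h : P = [] ∧ V ≠ [] => hP h.1),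
      if_neg (fun h : P = [] ∧ V = [] => hP h.1), if_neg hP,
      pvCounts, PySem.List.count_eq, zero_add]
    set caN := List.count 'a' P with hcaN
    have hcb : ((P.length : Int) - (caN : Int)) = ((P.length - caN : Nat) : Int) := by push_cast; omega
    set cbN := P.length - caN with hcbN
    by_cases hsingle : ((caN : Int) = 0 ∨ (P.length : Int) - (caN : Int) = 0)
    · rw [if_pos hsingle, if_pos hsingle]
      have hmax : max ((caN : Int)) ((P.length : Int) - (caN : Int)) = ((max caN cbN : Nat) : Int) := by
        rw [hcb]; exact_mod_cast rfl
      have hm0 : 0 < max caN cbN := by omega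
      rw [hmax, PySem.Int.floordiv_natCast]
      set lN := V.length / max caN cbN with hlN
      by_cases hl0 : lN = 0
      · rw [if_pos (by exact_mod_cast congrArg (Nat.cast : Nat → Int) hl0)]
        have : ((lN : Int) == (0 : Int)) = true := by simp [hl0]
        rw [this, Bool.true_or]
      · have hlpos : 0 < lN := Nat.pos_of_ne_zero hl0
        rw [if_neg (by exact_mod_cast hl0)]
        have hbeq : ((lN : Int) == (0 : Int)) = false := by
          simp only [beq_eq_false_iff_ne, ne_eq, Int.natCast_eq_zero]
          exact hl0
        rw [hbeq, Bool.false_or]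
        have hle : lN ≤ V.length := Nat.div_le_self _ _
        rw [PySem.List.slice_to_natCast]
        rw [pvChunks V lN hlpos hle]
        rw [PySem.Int.mod_natCast, PySem.Int.floordiv_natCast]
        have hmod : (((V.length % lN : Nat) : Int) == (0 : Int)) = decide (lN ∣ V.length) := by
          rw [Bool.eq_iff_iff]
          simp only [beq_iff_eq, Int.natCast_eq_zero, decide_eq_true_eq]
          omega
        rw [hmod]
        have hrept : pvRepeat (V.take lN) ((V.length / lN : Nat) : Int) =
            (List.replicate (V.length / lN) (V.take lN)).flatten := by
          simp only [pvRepeat, Int.toNat_natCast]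
        rw [hrept]
    · rw [if_neg hsingle, if_neg hsingle]
      have hca0 : 0 < caN := by
        rcases Nat.eq_zero_or_pos caN with h | h
        · exact absurd (Or.inl (by exact_mod_cast h)) hsingle
        · exact h
      have hcb0 : 0 < cbN := by
        rcases Nat.eq_zero_or_pos cbN with h | h
        · refine absurd (Or.inr ?_) hsingle
          rw [hcb, h]; rfl
        · exact h
      have hmemA : 'a' ∈ P := by
        rw [← List.count_pos_iff]; exact hca0
      obtain ⟨kA, hkA⟩ : ∃ k, PySem.List.index? P 'a' = some k := by
        have := (PySem.List.index?_isSome_iff P 'a').mpr hmemA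
        exact Option.isSome_iff_exists.mp this
      obtain ⟨preA, sufA, hPsA, hlenA, hnotA⟩ := (PySem.List.index?_eq_some_iff P 'a' kA).mp hkA
      have htakeA : P.take kA = preA := by
        rw [hPsA, ← hlenA, List.take_left]
      have htwA : P.takeWhile (fun c => c != 'a') = preA := by
        rw [hPsA]; exact pvTW 'a' preA sufA hnotA
      simp only [hkA, PySem.Int.floordiv_natCast, PySem.List.slice_to_natCast,
        PySem.List.count_eq, htakeA]
      set bbaN := List.count 'b' preA with hbbaN
      apply pvAnyCongr
      intro al hal
      rw [PySem.List.mem_pyRange_iff_of_pos (by norm_num)] at hal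
      obtain ⟨hal0, hal1, -⟩ := hal
      obtain ⟨na, rfl⟩ := Int.eq_ofNat_of_zero_le hal0
      have hna : na ≤ V.length / caN := by
        have : (na : Int) < ((V.length / caN : Nat) : Int) + 1 := hal1
        exact_mod_cast Int.lt_add_one_iff.mp this
      have hnaca : na * caN ≤ V.length := (Nat.le_div_iff_mul_le hca0).mp hna
      have hnum : ((V.length : Int) - (na : Int) * (caN : Int)) = ((V.length - na * caN : Nat) : Int) := by
        push_cast; omega
      rw [hnum, hcb, PySem.Int.floordiv_natCast]
      set nbN := (V.length - na * caN) / cbN with hnbN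
      -- global bound: the total advance fits in V
      have hsumP : pvSum na nbN P ≤ V.length := by
        have h1 : pvSum na nbN P = na * List.count 'a' P + nbN * List.count 'b' P := pvSum_eq na nbN P
        have h2 := pvCountAB P
        have h3 : nbN * cbN ≤ V.length - na * caN := Nat.div_mul_le_self _ _
        have h3' : nbN * cbN + na * caN ≤ V.length := (Nat.le_sub_iff_add_le hnaca).mp h3
        have h4 : nbN * List.count 'b' P ≤ nbN * cbN :=
          Nat.mul_le_mul_left _ (by simp only [List.count] at *; omega)
        rw [h1, ← hcaN]
        linarith
      -- the 'a' candidate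
      have hoffA : pvSum na nbN preA + pvAdv na nbN 'a' ≤ pvSum na nbN P := by
        rw [hPsA, pvSum_append, pvSum_cons]
        omega
      have hpreA : pvSum na nbN preA = nbN * bbaN := by
        rw [pvSum_eq, List.count_eq_zero.mpr hnotA]
        simp [hbbaN]
      have hadvA : pvAdv na nbN 'a' = na := by simp [pvAdv]
      have hbndA : nbN * bbaN + na ≤ V.length := by
        rw [hpreA, hadvA] at hoffA
        linarith
      have haC : ((V.drop (nbN * bbaN)).take na).length = na := by
        rw [List.length_take, List.length_drop]
        exact Nat.min_eq_left ((Nat.le_sub_iff_add_le (by linarith)).mpr (by linarith))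
      have hA : ([] : List Char) = (V.drop (nbN * bbaN)).take na ∨ (([] : List Char) = [] ∧
          ('a' ∈ P → (V.drop (nbN * bbaN)).take na
            = (V.drop (0 + nbN * ((P.takeWhile (fun c => c != 'a')).count 'b'))).take na) ∧
          ('a' ∉ P → (V.drop (nbN * bbaN)).take na = [])) := by
        refine Or.inr ⟨rfl, fun _ => ?_, fun h => absurd hmemA h⟩
        rw [htwA, Nat.zero_add, hbbaN]
      -- cast for the initial offset
      have hz : (0 : Int) = ((0 : Nat) : Int) := rfl
      by_cases hbP : 'b' ∈ P
      · obtain ⟨kB, hkB⟩ : ∃ k, PySem.List.index? P 'b' = some k := by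
          have := (PySem.List.index?_isSome_iff P 'b').mpr hbP
          exact Option.isSome_iff_exists.mp this
        obtain ⟨preB, sufB, hPsB, hlenB, hnotB⟩ := (PySem.List.index?_eq_some_iff P 'b' kB).mp hkB
        have htakeB : P.take kB = preB := by
          rw [hPsB, ← hlenB, List.take_left]
        have htwB : P.takeWhile (fun c => c != 'b') = preB := by
          rw [hPsB]; exact pvTW 'b' preB sufB hnotB
        rw [if_pos hbP, if_pos hbP]
        simp only [hkB, PySem.List.slice_to_natCast, PySem.List.count_eq, htakeB]
        set abbN := List.count 'a' preB with habbN
        have hoffB : pvSum na nbN preB + pvAdv na nbN 'b' ≤ pvSum na nbN P := by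
          rw [hPsB, pvSum_append, pvSum_cons]
          omega
        have hpreB : pvSum na nbN preB = na * abbN := by
          rw [pvSum_eq, List.count_eq_zero.mpr hnotB]
          simp [habbN]
        have hadvB : pvAdv na nbN 'b' = nbN := by simp [pvAdv]
        have hbndB : na * abbN + nbN ≤ V.length := by
          rw [hpreB, hadvB] at hoffB
          linarith
        have hbC : ((V.drop (na * abbN)).take nbN).length = nbN ∨
            ((V.drop (na * abbN)).take nbN = [] ∧ 'b' ∉ P) := by
          left
          rw [List.length_take, List.length_drop]
          exact Nat.min_eq_left ((Nat.le_sub_iff_add_le (by linarith)).mpr (by linarith))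
        have hB : ([] : List Char) = (V.drop (na * abbN)).take nbN ∨ (([] : List Char) = [] ∧
            ('b' ∈ P → (V.drop (na * abbN)).take nbN
              = (V.drop (0 + na * ((P.takeWhile (fun c => c != 'b')).count 'a'))).take nbN) ∧
            ('b' ∉ P → (V.drop (na * abbN)).take nbN = [])) := by
          refine Or.inr ⟨rfl, fun _ => ?_, fun h => absurd hbP h⟩
          rw [htwB, Nat.zero_add, habbN]
        have hrun := pvRun V na nbN ((V.drop (nbN * bbaN)).take na) ((V.drop (na * abbN)).take nbN)
          haC P 0 [] [] (by rw [Nat.zero_add]; exact hsumP) hA hB hbC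
        simp only [pvCheck, Nat.cast_zero, List.drop_zero] at hrun
        rw [hrun]
        -- now identify B's candidates with ours
        have hcastA : ((nbN : Int) * (bbaN : Int)) = (((nbN * bbaN : Nat)) : Int) := by push_cast; ring
        have hcastA2 : (((nbN * bbaN : Nat)) : Int) + ((na : Nat) : Int) = ((nbN * bbaN + na : Nat) : Int) := by push_cast; ring
        have hcastB : ((na : Int) * (abbN : Int)) = (((na * abbN : Nat)) : Int) := by push_cast; ring
        rw [hcastA, hcastB, PySem.List.slice_natCast_add, PySem.List.slice_natCast_add]
        have hfun : pvPiece ((V.drop (nbN * bbaN)).take na) ((V.drop (na * abbN)).take nbN)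
            = (fun c => if c = 'a' then (V.drop (nbN * bbaN)).take na
                else if c = 'b' then (V.drop (na * abbN)).take nbN else []) := rfl
        rw [hfun]
        exact Bool.and_comm _ _
      · rw [if_neg hbP]
        have hbC : (([] : List Char).length = nbN) ∨ (([] : List Char) = [] ∧ 'b' ∉ P) :=
          Or.inr ⟨rfl, hbP⟩
        have hB : ([] : List Char) = ([] : List Char) ∨ (([] : List Char) = [] ∧
            ('b' ∈ P → ([] : List Char)
              = (V.drop (0 + na * ((P.takeWhile (fun c => c != 'b')).count 'a'))).take nbN) ∧
            ('b' ∉ P → ([] : List Char) = ([] : List Char))) := Or.inl rfl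
        have hrun := pvRun V na nbN ((V.drop (nbN * bbaN)).take na) []
          haC P 0 [] [] (by rw [Nat.zero_add]; exact hsumP) hA hB hbC
        simp only [pvCheck, Nat.cast_zero, List.drop_zero] at hrun
        rw [hrun]
        have hcastA : ((nbN : Int) * (bbaN : Int)) = (((nbN * bbaN : Nat)) : Int) := by push_cast; ring
        rw [hcastA, PySem.List.slice_natCast_add]
        have hfun : pvPiece ((V.drop (nbN * bbaN)).take na) ([] : List Char)
            = (fun c => if c = 'a' then (V.drop (nbN * bbaN)).take na
                else if c = 'b' then ([] : List Char) else []) := rfl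
        rw [hfun]
        exact Bool.and_comm _ _

-- ===== VERDICT (by name: the statement is the Claim_ definition above) =====
theorem patternMatching_spec : Claim_equal_patternMatching := by
  intro pattern value _
  unfold Spec_patternMatching patternMatching patternMatching_alt
  exact pvA_eq_pvB pattern.toList value.toList
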